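-- pv_equiv track=rewrite | github.com/AliKhanat88/codeforces | newbatch/gcdSequence.py | check
-- ===== SOURCE A (Python) =====
-- from math import gcd
--
-- def check(arr):
--     per = -1
--     for i in range(1, len(arr)):
--         temp = gcd(arr[i], arr[i-1])
--         if temp < per:
--             return False
--         per = temp
--     return True
-- ===== SOURCE B (Python) =====
-- from math import gcd
--
-- def check(arr):
--     gcds = [gcd(x, y) for x, y in zip(arr[1:], arr)]
--     return gcds == sorted(gcds)
-- ===== Notes on version B (the rewrite author's own statement) =====
-- stated objective: idiomatic
-- what changed: Materialize the list of adjacent gcds with a zip comprehension and test monotonicity by comparing it to its sorted copy, instead of A's streaming index loop with a 'previous' accumulator and early return.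
import Mathlib
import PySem

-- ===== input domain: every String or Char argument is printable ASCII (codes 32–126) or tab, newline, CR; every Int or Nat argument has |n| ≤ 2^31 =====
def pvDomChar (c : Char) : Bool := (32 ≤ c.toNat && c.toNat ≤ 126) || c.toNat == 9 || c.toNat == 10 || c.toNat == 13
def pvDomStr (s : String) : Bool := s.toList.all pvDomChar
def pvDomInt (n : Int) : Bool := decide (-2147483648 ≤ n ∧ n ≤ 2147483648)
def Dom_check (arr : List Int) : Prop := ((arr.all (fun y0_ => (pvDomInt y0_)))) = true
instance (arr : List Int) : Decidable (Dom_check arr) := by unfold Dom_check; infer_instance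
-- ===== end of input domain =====

-- B builds the adjacent-gcd list and compares it with its sorted copy, replacing A's
-- streaming loop with a 'previous' accumulator; objective: a more idiomatic decomposition.


-- ===== PORT A =====
-- the 'for i in range(1, len(arr))' loop; arr[i] is always in range, so pyGetD is exact here
def checkLoop (arr : List Int) (idxs : List Int) (per : Int) : Bool :=
  match idxs with
  | [] => true
  | i :: rest =>
      let temp : Int := Int.gcd (PySem.List.pyGetD arr i 0) (PySem.List.pyGetD arr (i - 1) 0)
      if temp < per then false else checkLoop arr rest temp

def check (arr : List Int) : Bool :=
  checkLoop arr (PySem.List.pyRange 1 (arr.length : Int) 1) (-1)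

-- ===== PORT B =====
def check_alt (arr : List Int) : Bool :=
  let gcds : List Int := ((PySem.List.slice arr (some 1) none).zip arr).map
    (fun p => (Int.gcd p.1 p.2 : Int))
  gcds == PySem.List.sorted gcds (fun x => x) false

-- ===== PRECONDITION & SPEC =====
def Spec_check (arr : List Int) (out : Bool) : Prop := out = check_alt arr
instance (arr : List Int) (out : Bool) : Decidable (Spec_check arr out) := by unfold Spec_check; infer_instance

-- ===== CLAIM (what is proved, stated in full; the proofs are below) =====
def Claim_equal_check : Prop := ∀ (arr : List Int), Dom_check arr → Spec_check arr (check arr)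

-- ===== LEMMAS AND PROOFS =====

def gcdList (arr : List Int) : List Int :=
  ((arr.drop 1).zip arr).map (fun p => (Int.gcd p.1 p.2 : Int))

theorem gcdList_nonneg (arr : List Int) : ∀ x ∈ gcdList arr, 0 ≤ x := by
  intro x hx
  simp only [gcdList, List.mem_map] at hx
  obtain ⟨p, _, rfl⟩ := hx
  exact Int.natCast_nonneg _

-- goB: the behaviour of checkLoop once indices are resolved into the gcd values
def goB (per : Int) (l : List Int) : Bool :=
  match l with
  | [] => true
  | g :: gs => if g < per then false else goB g gs

theorem goB_iff_pairwise (l : List Int) (per : Int) :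
    goB per l = true ↔ List.Pairwise (· ≤ ·) (per :: l) := by
  induction l generalizing per with
  | nil => simp [goB]
  | cons g gs ih =>
      simp only [goB]
      by_cases h : g < per
      · simp only [h, if_true]
        constructor
        · intro hf; exact absurd hf (by simp)
        · intro hp
          have := List.rel_of_pairwise_cons hp (List.mem_cons_self)
          omega
      · simp only [h, if_false]
        rw [ih]
        constructor
        · intro hp
          refine List.Pairwise.cons ?_ hp
          intro x hx
          rcases List.mem_cons.mp hx with rfl | hx
          · omega
          · exact le_trans (by omega) (List.rel_of_pairwise_cons hp hx)
        · intro hp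
          exact hp.of_cons

theorem checkLoop_eq_goB (n : Nat) : ∀ (arr : List Int) (j : Nat) (per : Int),
    arr.length ≤ j + 1 + n →
    checkLoop arr (PySem.List.pyRange ((j : Int) + 1) (arr.length : Int) 1) per
      = goB per (((arr.drop (j + 1)).zip (arr.drop j)).map (fun p => (Int.gcd p.1 p.2 : Int))) := by
  induction n with
  | zero =>
      intro arr j per h
      rw [PySem.List.pyRange_one_eq_nil (by omega)]
      rw [List.drop_eq_nil_of_le (by omega)]
      simp [checkLoop, goB]
  | succ n ih =>
      intro arr j per h
      by_cases hlt : j + 1 < arr.length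
      · rw [PySem.List.pyRange_one_cons (by omega)]
        have h1 : PySem.List.pyGetD arr ((j : Int) + 1) 0 = arr[j + 1] := by
          rw [show ((j : Int) + 1) = ((j + 1 : Nat) : Int) by push_cast; ring]
          rw [PySem.List.pyGetD_of_nonneg arr 0 (by omega)]
          simp [List.getD_eq_getElem?_getD, List.getElem?_eq_getElem hlt]
        have h0 : PySem.List.pyGetD arr ((j : Int) + 1 - 1) 0 = arr[j] := by
          rw [show ((j : Int) + 1 - 1) = ((j : Nat) : Int) by ring]
          rw [PySem.List.pyGetD_of_nonneg arr 0 (by omega)]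
          simp [List.getD_eq_getElem?_getD, List.getElem?_eq_getElem (by omega : j < arr.length)]
        have hd1 : arr.drop j = arr[j] :: arr.drop (j + 1) :=
          List.drop_eq_getElem_cons (by omega)
        have hd2 : arr.drop (j + 1) = arr[j + 1] :: arr.drop (j + 2) :=
          List.drop_eq_getElem_cons hlt
        simp only [checkLoop, h1, h0]
        rw [hd2, hd1]
        simp only [List.zip_cons_cons, List.map_cons, goB]
        by_cases hc : (Int.gcd arr[j + 1] arr[j] : Int) < per
        · simp [hc]
        · simp only [hc, if_false]
          have hih := ih arr (j + 1) ((Int.gcd arr[j + 1] arr[j] : Int)) (by omega)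
          rw [show ((j : Int) + 1 + 1) = (((j + 1 : Nat) : Int) + 1) by push_cast; ring]
          rw [hih, show j + 1 + 1 = j + 2 by ring]
      · rw [PySem.List.pyRange_one_eq_nil (by omega)]
        rw [List.drop_eq_nil_of_le (by omega)]
        simp [checkLoop, goB]

theorem check_eq_goB (arr : List Int) : check arr = goB (-1) (gcdList arr) := by
  have h := checkLoop_eq_goB arr.length arr 0 (-1) (by omega)
  simpa [check, gcdList] using h

theorem check_iff_pairwise (arr : List Int) :
    check arr = true ↔ (gcdList arr).Pairwise (· ≤ ·) := by
  rw [check_eq_goB, goB_iff_pairwise, List.pairwise_cons]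
  constructor
  · exact fun h => h.2
  · intro h
    exact ⟨fun g hg => le_trans (by omega) (gcdList_nonneg arr g hg), h⟩

theorem check_alt_iff_pairwise (arr : List Int) :
    check_alt arr = true ↔ (gcdList arr).Pairwise (· ≤ ·) := by
  have hsl : PySem.List.slice arr (some 1) none = arr.drop 1 := by
    rw [PySem.List.slice_from_one]
    cases arr <;> rfl
  show (((PySem.List.slice arr (some 1) none).zip arr).map
      (fun p => (Int.gcd p.1 p.2 : Int)) ==
    PySem.List.sorted (((PySem.List.slice arr (some 1) none).zip arr).map
      (fun p => (Int.gcd p.1 p.2 : Int))) (fun x => x) false) = true ↔ _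
  rw [hsl]
  show (gcdList arr == PySem.List.sorted (gcdList arr) (fun x => x) false) = true ↔ _
  rw [beq_iff_eq]
  constructor
  · intro h
    have hp := PySem.List.sorted_pairwise (gcdList arr) (fun x => x)
    rw [← h] at hp
    simpa using hp
  · intro h
    exact (PySem.List.sorted_eq_self_of_pairwise (gcdList arr) (fun x => x) (by simpa using h)).symm

-- ===== VERDICT (by name: the statement is the Claim_ definition above) =====
theorem check_spec : Claim_equal_check := by
  intro arr _
  unfold Spec_check
  have h1 := check_iff_pairwise arr
  have h2 := check_alt_iff_pairwise arr
  cases hA : check arr <;> cases hB : check_alt arr <;> simp_all
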